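-- pv_equiv track=rewrite | github.com/therbert448/Advent-of-Code | 2019/Day22.py | apply_equation
-- ===== SOURCE A (Python) =====
-- def apply_equation(A, B, N, n): #apply equation n times and find the new A, B
--     #recursive, breaking down n as much as possible
--     #A(Ax + B) + B = A**2x + AB + B
--     #If I know the AB pair after n shuffles, then applying the equation with
--     #this AB pair will give me the AB pair after 2n shuffles.
--     #n+1 shuffles means apply the original AB pair for one shuffle to the AB
--     #pair for n shuffles.
--     #Helps break the original n down to ~log2(n) equations
--     if n == 0: #no need to apply equation, A = 1 and B = 0
--         return 1, 0
--     elif n % 2 == 0: #even number of applications left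
--         A, B = [(A**2) % N, ((A*B)+B) % N]
--         A, B = apply_equation(A, B, N, n//2)
--         return A, B
--     else: #odd number left
--         a, b = apply_equation(A, B, N, n-1)
--         A, B = [(A*a) % N, ((A*b)+B) % N]
--         return A, B
-- ===== SOURCE B (Python) =====
-- def apply_equation(A, B, N, n):
--     # iterative exponentiation-by-squaring over the affine-map monoid (a, b) -> a*x + b
--     result = (1, 0)
--     base = (A, B)
--     while n:
--         if n & 1:
--             result = ((result[0] * base[0]) % N, (base[0] * result[1] + base[1]) % N)
--         base = ((base[0] * base[0]) % N, (base[0] * base[1] + base[1]) % N)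
--         n >>= 1
--     a, b = result
--     return a, b
-- ===== Notes on version B (the rewrite author's own statement) =====
-- stated objective: alternative
-- what changed: Replaces the parity recursion with an iterative square-and-multiply loop over explicit (a,b) affine-map pairs composed mod N, accumulating into a result pair instead of recursing on n.
import Mathlib
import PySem

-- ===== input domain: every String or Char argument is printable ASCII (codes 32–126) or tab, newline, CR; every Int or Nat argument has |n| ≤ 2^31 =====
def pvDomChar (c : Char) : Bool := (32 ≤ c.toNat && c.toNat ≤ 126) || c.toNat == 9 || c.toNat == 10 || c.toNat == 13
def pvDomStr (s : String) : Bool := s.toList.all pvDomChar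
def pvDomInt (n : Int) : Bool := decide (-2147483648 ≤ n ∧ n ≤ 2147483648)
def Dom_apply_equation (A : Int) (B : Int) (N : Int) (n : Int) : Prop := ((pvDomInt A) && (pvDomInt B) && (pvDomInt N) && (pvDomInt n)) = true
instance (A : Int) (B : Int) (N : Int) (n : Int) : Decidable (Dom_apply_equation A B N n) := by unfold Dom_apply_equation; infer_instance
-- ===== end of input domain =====

-- B replaces A's parity recursion by an iterative square-and-multiply loop over affine pairs; same cost, different decomposition.

-- ===== PORT A =====
-- Python A recurses on n; for n < 0 it never terminates (RecursionError), excluded by Pre_.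
-- The recursion is mirrored on the Nat value n.toNat (= n on the admitted domain 0 ≤ n).
def applyEqAux (A : Int) (B : Int) (N : Int) (m : Nat) : Int × Int :=
  if m = 0 then (1, 0)
  else if m % 2 = 0 then
    applyEqAux (PySem.Int.mod (A ^ 2) N) (PySem.Int.mod (A * B + B) N) N (m / 2)
  else
    let p := applyEqAux A B N (m - 1)
    (PySem.Int.mod (A * p.1) N, PySem.Int.mod (A * p.2 + B) N)
termination_by m
decreasing_by all_goals omega

def apply_equation (A : Int) (B : Int) (N : Int) (n : Int) : Int × Int :=
  applyEqAux A B N n.toNat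

-- ===== PORT B =====
-- compose of two affine maps with Python's mod, as in Source B's loop body
def pvCompose (N : Int) (p q : Int × Int) : Int × Int :=
  (PySem.Int.mod (p.1 * q.1) N, PySem.Int.mod (q.1 * p.2 + q.2) N)

-- the `while n:` loop of Source B; n >>= 1 is m / 2 on the admitted domain 0 ≤ n
def pvLoop (N : Int) (res base : Int × Int) (m : Nat) : Int × Int :=
  if m = 0 then res
  else pvLoop N (if m % 2 = 1 then pvCompose N res base else res) (pvCompose N base base) (m / 2)
termination_by m
decreasing_by omega

def apply_equation_alt (A : Int) (B : Int) (N : Int) (n : Int) : Int × Int :=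
  pvLoop N (1, 0) (A, B) n.toNat

-- ===== PRECONDITION & SPEC =====
-- Pre_ excludes exactly the inputs where Python A raises: n < 0 (unbounded recursion,
-- RecursionError) and n > 0 with N = 0 (ZeroDivisionError from % N). A returns on all other inputs.
def Pre_apply_equation (A : Int) (B : Int) (N : Int) (n : Int) : Prop :=
  0 ≤ n ∧ (n = 0 ∨ N ≠ 0)
instance (A : Int) (B : Int) (N : Int) (n : Int) : Decidable (Pre_apply_equation A B N n) := by unfold Pre_apply_equation; infer_instance

def pvWitness_apply_equation : Int × Int × Int × Int := (2, 3, 10, 5)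

def Spec_apply_equation (A : Int) (B : Int) (N : Int) (n : Int) (out : Int × Int) : Prop := out = apply_equation_alt A B N n
instance (A : Int) (B : Int) (N : Int) (n : Int) (out : Int × Int) : Decidable (Spec_apply_equation A B N n out) := by unfold Spec_apply_equation; infer_instance

-- ===== CLAIM (what is proved, stated in full; the proofs are below) =====
def Claim_equal_apply_equation : Prop := ∀ (A : Int) (B : Int) (N : Int) (n : Int), Dom_apply_equation A B N n → Pre_apply_equation A B N n → Spec_apply_equation A B N n (apply_equation A B N n)

-- ===== LEMMAS AND PROOFS =====

-- pure (mod-free) affine composition and its powers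
def acmp (p q : Int × Int) : Int × Int := (p.1 * q.1, q.1 * p.2 + q.2)

def pw (b : Int × Int) : Nat → Int × Int
  | 0 => (1, 0)
  | k + 1 => acmp (pw b k) b

theorem acmp_assoc (p q r : Int × Int) : acmp (acmp p q) r = acmp p (acmp q r) := by
  refine Prod.ext ?_ ?_ <;> simp only [acmp] <;> ring

theorem pw_succ_left (b : Int × Int) (k : Nat) : acmp b (pw b k) = pw b (k + 1) := by
  induction k with
  | zero => refine Prod.ext ?_ ?_ <;> simp only [pw, acmp] <;> ring
  | succ k ih =>
    calc acmp b (pw b (k + 1)) = acmp b (acmp (pw b k) b) := by rw [pw]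
      _ = acmp (acmp b (pw b k)) b := (acmp_assoc b (pw b k) b).symm
      _ = acmp (pw b (k + 1)) b := by rw [ih]
      _ = pw b (k + 1 + 1) := rfl

theorem pw_two_mul (b : Int × Int) (k : Nat) : pw (acmp b b) k = pw b (2 * k) := by
  induction k with
  | zero => rfl
  | succ k ih =>
    have h2 : 2 * (k + 1) = (2 * k + 1) + 1 := by omega
    rw [pw, ih, h2, pw, pw, acmp_assoc]

-- Python mod (Int.fmod) respects congruence mod N and is itself congruent to its argument
theorem pymod_congr {N a b : Int} (h : a ≡ b [ZMOD N]) :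
    PySem.Int.mod a N = PySem.Int.mod b N := by
  have h' : a % N = b % N := h
  have hd : (N ∣ a) ↔ (N ∣ b) := by
    rw [Int.dvd_iff_emod_eq_zero, Int.dvd_iff_emod_eq_zero, h']
  simp only [PySem.Int.mod, Int.fmod_eq_emod, h', hd]

theorem pymod_meq (a N : Int) : PySem.Int.mod a N ≡ a [ZMOD N] := by
  show PySem.Int.mod a N % N = a % N
  simp only [PySem.Int.mod, Int.fmod_eq_emod]
  split_ifs
  · rw [add_zero, Int.emod_emod_of_dvd a (dvd_refl N)]
  · have h1 : a % N + N = a % N + N * 1 := by ring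
    rw [h1, Int.add_mul_emod_self_left, Int.emod_emod_of_dvd a (dvd_refl N)]

-- componentwise congruence of pairs
def MEq (N : Int) (p q : Int × Int) : Prop := p.1 ≡ q.1 [ZMOD N] ∧ p.2 ≡ q.2 [ZMOD N]

theorem MEq.refl (N : Int) (p : Int × Int) : MEq N p p := ⟨Int.ModEq.refl _, Int.ModEq.refl _⟩

theorem acmp_meq {N : Int} {p p' q q' : Int × Int} (hp : MEq N p p') (hq : MEq N q q') :
    MEq N (acmp p q) (acmp p' q') :=
  ⟨hp.1.mul hq.1, (hq.1.mul hp.2).add hq.2⟩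

theorem pw_meq {N : Int} {b b' : Int × Int} (h : MEq N b b') (k : Nat) :
    MEq N (pw b k) (pw b' k) := by
  induction k with
  | zero => exact MEq.refl N _
  | succ k ih => exact acmp_meq ih h

theorem pvCompose_eq (N : Int) (p q : Int × Int) :
    pvCompose N p q = (PySem.Int.mod ((acmp p q).1) N, PySem.Int.mod ((acmp p q).2) N) := rfl

theorem pvCompose_meq (N : Int) (p q : Int × Int) : MEq N (pvCompose N p q) (acmp p q) :=
  ⟨pymod_meq _ _, pymod_meq _ _⟩

-- A's recursion computes the fully reduced power of the affine map (A, B)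
theorem auxA (N : Int) : ∀ m : Nat, 1 ≤ m → ∀ A B : Int,
    applyEqAux A B N m = (PySem.Int.mod ((pw (A, B) m).1) N, PySem.Int.mod ((pw (A, B) m).2) N) := by
  intro m
  induction m using Nat.strong_induction_on with
  | _ m ih =>
    intro hm A B
    rw [applyEqAux]
    have hm0 : ¬ m = 0 := by omega
    simp only [hm0, if_false]
    by_cases he : m % 2 = 0
    · simp only [he, if_true]
      have hk1 : 1 ≤ m / 2 := by omega
      rw [ih (m / 2) (by omega) hk1]
      have hmeq : MEq N ((PySem.Int.mod (A ^ 2) N, PySem.Int.mod (A * B + B) N) : Int × Int)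
          (acmp (A, B) (A, B)) := by
        refine ⟨?_, pymod_meq _ _⟩
        have : (A ^ 2) = (acmp (A, B) (A, B)).1 := by simp only [acmp]; ring
        rw [← this]; exact pymod_meq _ _
      have h1 : MEq N (pw (PySem.Int.mod (A ^ 2) N, PySem.Int.mod (A * B + B) N) (m / 2))
          (pw (A, B) m) := by
        have := pw_meq hmeq (m / 2)
        rwa [pw_two_mul, (by omega : 2 * (m / 2) = m)] at this
      rw [pymod_congr h1.1, pymod_congr h1.2]
    · simp only [he, if_false]
      have hp : MEq N (applyEqAux A B N (m - 1)) (pw (A, B) (m - 1)) := by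
        by_cases h1 : m = 1
        · subst h1; rw [applyEqAux]; exact MEq.refl N _
        · rw [ih (m - 1) (by omega) (by omega)]
          exact ⟨pymod_meq _ _, pymod_meq _ _⟩
      have hstep : pw (A, B) m = acmp (pw (A, B) (m - 1)) (A, B) := by
        have : m = (m - 1) + 1 := by omega
        rw [this]; rfl
      refine Prod.ext ?_ ?_
      · show PySem.Int.mod (A * (applyEqAux A B N (m - 1)).1) N = _
        apply pymod_congr
        rw [hstep]
        calc A * (applyEqAux A B N (m - 1)).1
            ≡ A * (pw (A, B) (m - 1)).1 [ZMOD N] := (Int.ModEq.refl A).mul hp.1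
          _ = (acmp (pw (A, B) (m - 1)) (A, B)).1 := by simp only [acmp]; ring
      · show PySem.Int.mod (A * (applyEqAux A B N (m - 1)).2 + B) N = _
        apply pymod_congr
        rw [hstep]
        calc A * (applyEqAux A B N (m - 1)).2 + B
            ≡ A * (pw (A, B) (m - 1)).2 + B [ZMOD N] := ((Int.ModEq.refl A).mul hp.2).add (Int.ModEq.refl B)
          _ = (acmp (pw (A, B) (m - 1)) (A, B)).2 := by simp only [acmp]

-- B's loop invariant: it computes the reduced composition of the accumulator with base^m
theorem auxB (N : Int) : ∀ m : Nat, 1 ≤ m → ∀ r b : Int × Int,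
    pvLoop N r b m = (PySem.Int.mod ((acmp r (pw b m)).1) N, PySem.Int.mod ((acmp r (pw b m)).2) N) := by
  intro m
  induction m using Nat.strong_induction_on with
  | _ m ih =>
    intro hm r b
    rw [pvLoop]
    have hm0 : ¬ m = 0 := by omega
    simp only [hm0, if_false]
    by_cases h1 : m = 1
    · subst h1
      rw [pvLoop]
      simp only [Nat.reduceMod, if_true]
      rw [pvCompose_eq]
      have e1 : (acmp r b).1 = (acmp r (pw b 1)).1 := by simp only [acmp, pw]; ring
      have e2 : (acmp r b).2 = (acmp r (pw b 1)).2 := by simp only [acmp, pw]; ring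
      rw [e1, e2]
    · have hk1 : 1 ≤ m / 2 := by omega
      rw [ih (m / 2) (by omega) hk1]
      set r' := if m % 2 = 1 then pvCompose N r b else r with hr'
      have hrm : MEq N r' (if m % 2 = 1 then acmp r b else r) := by
        by_cases ho : m % 2 = 1 <;> simp only [hr', ho, if_true, if_false]
        · exact pvCompose_meq N r b
        · exact MEq.refl N r
      have hbm : MEq N (pvCompose N b b) (acmp b b) := pvCompose_meq N b b
      have hmain : MEq N (acmp r' (pw (pvCompose N b b) (m / 2))) (acmp r (pw b m)) := by
        have step1 : MEq N (acmp r' (pw (pvCompose N b b) (m / 2)))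
            (acmp (if m % 2 = 1 then acmp r b else r) (pw (acmp b b) (m / 2))) :=
          acmp_meq hrm (pw_meq hbm (m / 2))
        have step2 : acmp (if m % 2 = 1 then acmp r b else r) (pw (acmp b b) (m / 2))
            = acmp r (pw b m) := by
          rw [pw_two_mul]
          by_cases ho : m % 2 = 1
          · simp only [ho, if_true]
            rw [acmp_assoc, pw_succ_left, (by omega : 2 * (m / 2) + 1 = m)]
          · simp only [ho, if_false]
            rw [(by omega : 2 * (m / 2) = m)]
        rw [step2] at step1; exact step1
      rw [pymod_congr hmain.1, pymod_congr hmain.2]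

-- ===== VERDICT (by name: the statement is the Claim_ definition above) =====
theorem apply_equation_spec : Claim_equal_apply_equation := by
  intro A B N n _ hpre
  show apply_equation A B N n = apply_equation_alt A B N n
  by_cases hn : n.toNat = 0
  · unfold apply_equation apply_equation_alt
    rw [hn, applyEqAux, pvLoop]; rfl
  · have hm : 1 ≤ n.toNat := by omega
    unfold apply_equation apply_equation_alt
    rw [auxA N n.toNat hm A B, auxB N n.toNat hm (1, 0) (A, B)]
    have e1 : (pw (A, B) n.toNat).1 = (acmp (1, 0) (pw (A, B) n.toNat)).1 := by simp only [acmp]; ring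
    have e2 : (pw (A, B) n.toNat).2 = (acmp (1, 0) (pw (A, B) n.toNat)).2 := by simp only [acmp]; ring
    rw [e1, e2]
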